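-- pv_equiv track=rewrite | github.com/ElectronicBabylonianLiterature/ebl-api | ebl/fragmentarium/matching_fragments/score.py | weight_subsequence
-- ===== SOURCE A (Python) =====
-- def weight_subsequence(seq_of_seq):
--     weighting = []
--     for seq in seq_of_seq:
--         counter = 0
--         for i in seq:
--             if i == 0:
--                 counter = counter + 3
--             elif i == 1:
--                 counter = counter + 1
--             elif i == 2:
--                 counter = counter + 3
--             elif i == 3:
--                 counter = counter + 6
--             elif i == 4:
--                 counter = counter + 10
--             elif i == 5:
--                 counter = counter + 3
--             else:
--                 raise ValueError(f"{i} not a valiable ruling encoding")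
--             weighting.append(counter)
--     return max(weighting)
-- ===== SOURCE B (Python) =====
-- def weight_subsequence(seq_of_seq):
--     weights = {0: 3, 1: 1, 2: 3, 3: 6, 4: 10, 5: 3}
--     totals = []
--     for seq in seq_of_seq:
--         total = 0
--         for i in seq:
--             if i not in weights:
--                 raise ValueError(f"{i} not a valiable ruling encoding")
--             total += weights[i]
--         if seq:
--             totals.append(total)
--     return max(totals)
-- ===== Notes on version B (the rewrite author's own statement) =====
-- stated objective: simpler
-- what changed: Replaces the global list of every running prefix sum with a weight dictionary and one reduced total per non-empty subsequence (valid since all weights are non-negative, so each subsequence's maximal prefix sum is its total), returning the max of those totals.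
import Mathlib
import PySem

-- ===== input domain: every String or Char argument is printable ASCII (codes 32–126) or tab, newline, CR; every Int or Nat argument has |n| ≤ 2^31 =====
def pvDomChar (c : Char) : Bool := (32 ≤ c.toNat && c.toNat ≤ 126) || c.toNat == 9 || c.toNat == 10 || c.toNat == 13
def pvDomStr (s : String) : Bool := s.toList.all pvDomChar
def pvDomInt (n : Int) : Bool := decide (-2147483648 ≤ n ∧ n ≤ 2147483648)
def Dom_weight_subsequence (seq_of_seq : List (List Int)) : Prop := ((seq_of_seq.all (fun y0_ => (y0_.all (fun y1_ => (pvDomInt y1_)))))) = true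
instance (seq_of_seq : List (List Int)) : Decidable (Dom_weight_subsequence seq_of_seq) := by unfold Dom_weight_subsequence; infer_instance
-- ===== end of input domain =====

-- B replaces the global list of every running prefix sum with a weight dictionary and one
-- total per non-empty subsequence (weights are non-negative, so a subsequence's maximal
-- prefix sum is its total), returning the max of those totals; objective: simpler.


-- ===== PORT A =====
-- A's if/elif weight table; the unreachable-under-Pre_ else branch (Python raises) is 0
def pvWeightA (i : Int) : Int :=
  if i = 0 then 3
  else if i = 1 then 1
  else if i = 2 then 3
  else if i = 3 then 6
  else if i = 4 then 10
  else if i = 5 then 3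
  else 0

def weight_subsequence (seq_of_seq : List (List Int)) : Int :=
  let weighting : List Int :=
    seq_of_seq.foldl (fun w seq =>
      (seq.foldl (fun (p : List Int × Int) i =>
        (p.1 ++ [p.2 + pvWeightA i], p.2 + pvWeightA i)) (w, (0 : Int))).1) []
  (PySem.List.max? weighting (fun y => y)).getD 0

-- ===== PORT B =====
def pvWeightsDict : PySem.Dict Int Int := ⟨[(0, 3), (1, 1), (2, 3), (3, 6), (4, 10), (5, 3)]⟩

def weight_subsequence_alt (seq_of_seq : List (List Int)) : Int :=
  let totals : List Int :=
    seq_of_seq.foldl (fun ts seq =>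
      let t := seq.foldl (fun a i => a + PySem.Dict.getD pvWeightsDict i 0) 0
      if seq ≠ [] then ts ++ [t] else ts) []
  (PySem.List.max? totals (fun y => y)).getD 0

-- ===== PRECONDITION & SPEC =====
-- Pre_: exactly where A returns — some subsequence must be non-empty (otherwise Python's
-- max of an empty sequence raises ValueError) and every code is in 0..5 (otherwise A
-- raises ValueError on the first invalid code).
def Pre_weight_subsequence (seq_of_seq : List (List Int)) : Prop :=
  (∃ seq ∈ seq_of_seq, seq ≠ []) ∧ ∀ seq ∈ seq_of_seq, ∀ i ∈ seq, 0 ≤ i ∧ i ≤ 5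
instance (seq_of_seq : List (List Int)) : Decidable (Pre_weight_subsequence seq_of_seq) := by
  unfold Pre_weight_subsequence; infer_instance

def pvWitness_weight_subsequence : List (List Int) := [[0, 1], []]

def Spec_weight_subsequence (seq_of_seq : List (List Int)) (out : Int) : Prop := out = weight_subsequence_alt seq_of_seq
instance (seq_of_seq : List (List Int)) (out : Int) : Decidable (Spec_weight_subsequence seq_of_seq out) := by unfold Spec_weight_subsequence; infer_instance

-- ===== CLAIM (what is proved, stated in full; the proofs are below) =====
def Claim_equal_weight_subsequence : Prop := ∀ (seq_of_seq : List (List Int)), Dom_weight_subsequence seq_of_seq → Pre_weight_subsequence seq_of_seq → Spec_weight_subsequence seq_of_seq (weight_subsequence seq_of_seq)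

-- ===== LEMMAS AND PROOFS =====

-- the list of running prefix sums A appends for one subsequence, starting from counter c
def pvPref (c : Int) : List Int → List Int
  | [] => []
  | i :: t => (c + pvWeightA i) :: pvPref (c + pvWeightA i) t

-- the per-subsequence total B computes
def pvTotal (seq : List Int) : Int := (seq.map pvWeightA).sum

lemma pvWeightA_nonneg (i : Int) : 0 ≤ pvWeightA i := by
  unfold pvWeightA; split_ifs <;> norm_num

lemma pvTotal_nonneg (seq : List Int) : 0 ≤ pvTotal seq := by
  unfold pvTotal
  induction seq with
  | nil => simp
  | cons i t ih => simpa using add_nonneg (pvWeightA_nonneg i) ih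

lemma pvWeightB_eq (i : Int) : PySem.Dict.getD pvWeightsDict i 0 = pvWeightA i := by
  by_cases h0 : i = 0
  · subst h0; decide
  by_cases h1 : i = 1
  · subst h1; decide
  by_cases h2 : i = 2
  · subst h2; decide
  by_cases h3 : i = 3
  · subst h3; decide
  by_cases h4 : i = 4
  · subst h4; decide
  by_cases h5 : i = 5
  · subst h5; decide
  have hA : pvWeightA i = 0 := by simp [pvWeightA, h0, h1, h2, h3, h4, h5]
  rw [hA]
  simp only [PySem.Dict.getD, PySem.Dict.get?, pvWeightsDict]
  rw [List.find?_eq_none.mpr]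
  · rfl
  · intro p hp
    fin_cases hp <;> simp [beq_iff_eq] <;> omega

lemma innerA_eq (seq : List Int) : ∀ (w : List Int) (c : Int),
    seq.foldl (fun (p : List Int × Int) i =>
      (p.1 ++ [p.2 + pvWeightA i], p.2 + pvWeightA i)) (w, c)
      = (w ++ pvPref c seq, c + pvTotal seq) := by
  induction seq with
  | nil => intro w c; simp [pvPref, pvTotal]
  | cons i t ih =>
      intro w c
      simp only [List.foldl_cons, ih, pvPref, pvTotal, List.map_cons, List.sum_cons,
        Prod.mk.injEq, List.append_assoc, List.singleton_append]
      exact ⟨by simp, by ring⟩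

lemma weighting_eq (seq_of_seq : List (List Int)) : ∀ (acc : List Int),
    seq_of_seq.foldl (fun w seq =>
      (seq.foldl (fun (p : List Int × Int) i =>
        (p.1 ++ [p.2 + pvWeightA i], p.2 + pvWeightA i)) (w, (0 : Int))).1) acc
      = acc ++ seq_of_seq.flatMap (pvPref 0) := by
  induction seq_of_seq with
  | nil => intro acc; simp
  | cons seq rest ih =>
      intro acc
      rw [List.foldl_cons]
      have h : (List.foldl (fun (p : List Int × Int) i =>
          (p.1 ++ [p.2 + pvWeightA i], p.2 + pvWeightA i)) (acc, (0 : Int)) seq).1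
          = acc ++ pvPref 0 seq := by rw [innerA_eq]
      rw [h, ih, List.flatMap_cons, List.append_assoc]

lemma innerB_eq (seq : List Int) : ∀ (a : Int),
    seq.foldl (fun a i => a + PySem.Dict.getD pvWeightsDict i 0) a = a + pvTotal seq := by
  induction seq with
  | nil => intro a; simp [pvTotal]
  | cons i t ih =>
      intro a
      rw [List.foldl_cons, ih]
      simp only [pvWeightB_eq, pvTotal, List.map_cons, List.sum_cons]
      ring

lemma totals_eq (seq_of_seq : List (List Int)) : ∀ (acc : List Int),
    seq_of_seq.foldl (fun ts seq =>
      let t := seq.foldl (fun a i => a + PySem.Dict.getD pvWeightsDict i 0) 0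
      if seq ≠ [] then ts ++ [t] else ts) acc
      = acc ++ (seq_of_seq.filter (fun q => !q.isEmpty)).map pvTotal := by
  induction seq_of_seq with
  | nil => intro acc; simp
  | cons seq rest ih =>
      intro acc
      cases seq with
      | nil => simpa using ih acc
      | cons i t =>
          rw [List.foldl_cons]
          have hstep : (let t1 := (i :: t).foldl (fun a i => a + PySem.Dict.getD pvWeightsDict i 0) 0
              if i :: t ≠ [] then acc ++ [t1] else acc) = acc ++ [pvTotal (i :: t)] := by
            rw [innerB_eq]
            simp
          rw [hstep, ih]
          simp

lemma mem_pvPref_le (seq : List Int) : ∀ (c : Int), ∀ y ∈ pvPref c seq, y ≤ c + pvTotal seq := by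
  induction seq with
  | nil => intro c y hy; simp [pvPref] at hy
  | cons i t ih =>
      intro c y hy
      simp only [pvPref, List.mem_cons] at hy
      have htot : pvTotal (i :: t) = pvWeightA i + pvTotal t := by
        simp [pvTotal]
      rcases hy with rfl | hy
      · have := pvTotal_nonneg t; omega
      · have := ih (c + pvWeightA i) y hy; omega

lemma total_mem_pvPref (seq : List Int) (h : seq ≠ []) : ∀ (c : Int), c + pvTotal seq ∈ pvPref c seq := by
  induction seq with
  | nil => exact absurd rfl h
  | cons i t ih =>
      intro c
      have htot : pvTotal (i :: t) = pvWeightA i + pvTotal t := by simp [pvTotal]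
      by_cases ht : t = []
      · subst ht; simp [pvPref, pvTotal]
      · have := ih ht (c + pvWeightA i)
        simp only [pvPref, List.mem_cons]
        right
        have : c + pvWeightA i + pvTotal t = c + pvTotal (i :: t) := by omega
        rw [← this]
        exact ih ht (c + pvWeightA i)

lemma pvPref_eq_nil_iff (c : Int) (seq : List Int) : pvPref c seq = [] ↔ seq = [] := by
  cases seq <;> simp [pvPref]

lemma max?_id_eq_some {xs : List Int} {m : Int} (hm : m ∈ xs) (hmax : ∀ y ∈ xs, y ≤ m) :
    PySem.List.max? xs (fun y => y) = some m := by
  cases h : PySem.List.max? xs (fun y => y) with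
  | none =>
      rw [PySem.List.max?_eq_none_iff] at h
      subst h; simp at hm
  | some m' =>
      have h1 := PySem.List.max?_mem h
      have h2 := PySem.List.max?_isMax h
      exact congrArg some (le_antisymm (h2 m hm) (hmax m' h1)).symm

lemma max?_flat_eq_max?_totals (s : List (List Int)) :
    PySem.List.max? (s.flatMap (pvPref 0)) (fun y => y)
      = PySem.List.max? ((s.filter (fun q => !q.isEmpty)).map pvTotal) (fun y => y) := by
  cases hT : PySem.List.max? ((s.filter (fun q => !q.isEmpty)).map pvTotal) (fun y => y) with
  | none =>
      rw [PySem.List.max?_eq_none_iff] at hT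
      rw [PySem.List.max?_eq_none_iff]
      rw [List.map_eq_nil_iff, List.filter_eq_nil_iff] at hT
      rw [List.flatMap_eq_nil_iff]
      intro seq hseq
      rw [pvPref_eq_nil_iff]
      have := hT seq hseq
      simpa using this
  | some m =>
      have hmem := PySem.List.max?_mem hT
      have hmax := PySem.List.max?_isMax hT
      apply max?_id_eq_some
      · -- m = pvTotal seq for some non-empty seq ∈ s; its total is in its prefix list
        rcases List.mem_map.mp hmem with ⟨seq, hseq, rfl⟩
        rcases List.mem_filter.mp hseq with ⟨hs, hne⟩
        have hne' : seq ≠ [] := by simpa using hne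
        have := total_mem_pvPref seq hne' 0
        rw [zero_add] at this
        exact List.mem_flatMap.mpr ⟨seq, hs, this⟩
      · intro y hy
        rcases List.mem_flatMap.mp hy with ⟨seq, hs, hyp⟩
        have hne : seq ≠ [] := by
          intro h; subst h; simp [pvPref] at hyp
        have h1 : y ≤ pvTotal seq := by
          have := mem_pvPref_le seq 0 y hyp; omega
        have h2 : pvTotal seq ≤ m := by
          apply hmax
          exact List.mem_map.mpr ⟨seq, List.mem_filter.mpr ⟨hs, by simpa using hne⟩, rfl⟩
        omega

-- ===== VERDICT (by name: the statement is the Claim_ definition above) =====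
theorem weight_subsequence_spec : Claim_equal_weight_subsequence := by
  intro s _ _
  unfold Spec_weight_subsequence weight_subsequence weight_subsequence_alt
  simp only [weighting_eq, totals_eq, List.nil_append]
  rw [max?_flat_eq_max?_totals]
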